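-- pv_equiv track=rewrite | github.com/mikeczech/challenges | aoc/2023/day7/main.py | total_winnings
-- ===== SOURCE A (Python) =====
-- from collections import defaultdict
--
-- def rank_hand(hand):
--     counts = defaultdict(int)
--     for card in hand:
--         counts[card] += 1
--
--     counts_of_counts = defaultdict(int)
--     for count in counts.values():
--         counts_of_counts[count] += 1
--
--     by_cards = rank_hand_by_cards(hand)
--
--     rank = 0
--     if counts_of_counts[5] == 1:
--         rank = 6
--     elif counts_of_counts[4] == 1:
--         rank = 5
--     elif counts_of_counts[3] == 1 and counts_of_counts[2] == 1:
--         rank = 4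
--     elif counts_of_counts[3] == 1:
--         rank = 3
--     elif counts_of_counts[2] == 2:
--         rank = 2
--     elif counts_of_counts[2] == 1:
--         rank = 1
--     else:
--         rank = 0
--
--     return f"0x{rank:x}{by_cards}"
--
-- CARDS_ORDER = {c:hex(i) for i, c in enumerate(["A", "K", "Q", "J", "T", "9", "8", "7", "6", "5", "4", "3", "2"][::-1])}
--
-- def rank_hand_by_cards(hand):
--     return ''.join([CARDS_ORDER[c][2:] for c in hand])
--
-- def total_winnings(bids):
--     ranks = {}
--     for b in bids:
--         ranks[b] = rank_hand(b)
--
--     winnings = []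
--     for r, b in enumerate(sorted(bids.keys(), key=lambda x: ranks[x])):
--         winnings.append((r + 1) * bids[b])
--     return sum(winnings)
-- ===== SOURCE B (Python) =====
-- from collections import Counter
--
--
-- def hand_key(hand):
--     vals = list(Counter(hand).values())
--     if vals.count(5) == 1:
--         t = 6
--     elif vals.count(4) == 1:
--         t = 5
--     elif vals.count(3) == 1:
--         t = 4 if vals.count(2) == 1 else 3
--     elif vals.count(2) == 2:
--         t = 2
--     elif vals.count(2) == 1:
--         t = 1
--     else:
--         t = 0
--     return (t, ["23456789TJQKA".index(c) for c in hand])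
--
--
-- def total_winnings(bids):
--     # rank by counting: a hand's rank is 1 + the number of hands it beats,
--     # so no sorting pass is needed (all keys are distinct for distinct hands)
--     keys = {h: hand_key(h) for h in bids}
--     total = 0
--     for h, bid in bids.items():
--         beaten = sum(1 for o in bids if keys[o] < keys[h])
--         total += (1 + beaten) * bid
--     return total
-- ===== Notes on version B (the rewrite author's own statement) =====
-- stated objective: alternative
-- what changed: B eliminates the sort entirely: it computes each hand's payout rank as 1 + the number of hands with a smaller (type, card-strengths) tuple key, accumulating a pairwise-counting sum, where A builds per-hand hex-string keys, sorts the hands by them and sums (position+1)*bid over the enumerated sorted list; B also classifies a hand from the multiplicity list of Counter(hand) instead of A's counts-of-counts dict.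
import Mathlib
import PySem

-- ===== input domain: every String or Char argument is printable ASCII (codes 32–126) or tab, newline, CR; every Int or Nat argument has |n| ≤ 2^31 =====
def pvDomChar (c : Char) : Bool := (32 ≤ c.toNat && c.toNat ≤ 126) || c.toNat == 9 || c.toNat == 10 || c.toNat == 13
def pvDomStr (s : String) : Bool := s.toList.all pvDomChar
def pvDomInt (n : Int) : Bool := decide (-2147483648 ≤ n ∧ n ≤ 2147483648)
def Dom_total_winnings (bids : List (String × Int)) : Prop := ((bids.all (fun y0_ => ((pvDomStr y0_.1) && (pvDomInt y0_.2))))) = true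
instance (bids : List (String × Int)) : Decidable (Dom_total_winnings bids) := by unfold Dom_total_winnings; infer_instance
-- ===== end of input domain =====

-- B drops the sort entirely: each hand's payout factor is 1 + the number of hands it beats
-- under a (type, card-strengths) tuple key, so B is a pairwise-counting sum, not a
-- sort-then-enumerate (objective: alternative).

-- ===== PORT A =====
-- hex digit of i, exact for 0 ≤ i < 16 (all uses are in that range)
def pvHexDig (i : Int) : Char :=
  if i = 0 then '0' else if i = 1 then '1' else if i = 2 then '2' else if i = 3 then '3'
  else if i = 4 then '4' else if i = 5 then '5' else if i = 6 then '6' else if i = 7 then '7'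
  else if i = 8 then '8' else if i = 9 then '9' else if i = 10 then 'a' else if i = 11 then 'b'
  else if i = 12 then 'c' else if i = 13 then 'd' else if i = 14 then 'e' else if i = 15 then 'f'
  else '?'

def pvCardsRev : List Char := ['2','3','4','5','6','7','8','9','T','J','Q','K','A']

-- CARDS_ORDER = {c: hex(i) for i, c in enumerate([...][::-1])}
def CARDS_ORDER : PySem.Dict Char String :=
  (PySem.List.enumerate pvCardsRev 0).foldl
    (fun d p => d.insert p.2 (String.ofList ['0', 'x', pvHexDig p.1])) PySem.Dict.empty

-- ''.join([CARDS_ORDER[c][2:] for c in hand]); CARDS_ORDER[c] raises KeyError outside Pre_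
def rank_hand_by_cards (hand : String) : String :=
  PySem.Str.join "" (hand.toList.map (fun c => PySem.Str.slice (CARDS_ORDER.getD c "") (some 2) none))

def rank_hand (hand : String) : String :=
  let counts := hand.toList.foldl (fun d c => d.modify c 0 (· + 1)) (PySem.Dict.empty : PySem.Dict Char Int)
  let coc := counts.values.foldl (fun d n => d.modify n 0 (· + 1)) (PySem.Dict.empty : PySem.Dict Int Int)
  let by_cards := rank_hand_by_cards hand
  let rank : Int :=
    if coc.getD 5 0 = 1 then 6
    else if coc.getD 4 0 = 1 then 5
    else if coc.getD 3 0 = 1 ∧ coc.getD 2 0 = 1 then 4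
    else if coc.getD 3 0 = 1 then 3
    else if coc.getD 2 0 = 2 then 2
    else if coc.getD 2 0 = 1 then 1
    else 0
  -- f"0x{rank:x}{by_cards}": literal concatenation, exact since 0 ≤ rank < 16
  String.ofList ('0' :: 'x' :: pvHexDig rank :: by_cards.toList)

def total_winnings (bids : List (String × Int)) : Int :=
  let d := PySem.Dict.mk bids
  let ranks := d.keys.foldl (fun r b => r.insert b (rank_hand b)) (PySem.Dict.empty : PySem.Dict String String)
  let winnings := (PySem.List.enumerate (PySem.List.sorted d.keys (fun x => ranks.getD x "") false) 0).foldl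
      (fun acc rb => acc ++ [(rb.1 + 1) * d.getD rb.2 0]) ([] : List Int)
  winnings.sum

-- ===== PORT B =====
-- hand_key from Source B: (type from the multiplicity list of Counter(hand), card indices);
-- "...".index(c) raises ValueError outside Pre_
def pvHandKey (hand : String) : Int × List Int :=
  let vals := (PySem.Dict.counter hand.toList).values
  let t : Int :=
    if PySem.List.count vals 5 = 1 then 6
    else if PySem.List.count vals 4 = 1 then 5
    else if PySem.List.count vals 3 = 1 then (if PySem.List.count vals 2 = 1 then 4 else 3)
    else if PySem.List.count vals 2 = 2 then 2
    else if PySem.List.count vals 2 = 1 then 1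
    else 0
  (t, hand.toList.map (fun c => PySem.Str.find "23456789TJQKA" (String.ofList [c])))

-- Python's tuple comparison (t1, l1) < (t2, l2)
def pvKeyLt (a b : Int × List Int) : Bool :=
  decide (a.1 < b.1) || (decide (a.1 = b.1) && decide (a.2 < b.2))

def total_winnings_alt (bids : List (String × Int)) : Int :=
  let keys := bids.foldl (fun d p => d.insert p.1 (pvHandKey p.1)) (PySem.Dict.empty : PySem.Dict String (Int × List Int))
  bids.foldl (fun total p =>
    total + (1 + (bids.map Prod.fst).foldl
        (fun n o => if pvKeyLt (keys.getD o (0, [])) (keys.getD p.1 (0, [])) then n + 1 else n) (0 : Int)) * p.2) 0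

-- ===== PRECONDITION & SPEC =====
-- Nodup keys: the dict-representation invariant (a Python dict cannot hold a key twice);
-- the card condition: on any other character A raises KeyError (and B raises ValueError).
def Pre_total_winnings (bids : List (String × Int)) : Prop :=
  (bids.map Prod.fst).Nodup ∧
  ∀ p ∈ bids, (p.1.toList.all
    (fun c => decide (c ∈ (['2','3','4','5','6','7','8','9','T','J','Q','K','A'] : List Char)))) = true
instance (bids : List (String × Int)) : Decidable (Pre_total_winnings bids) := by
  unfold Pre_total_winnings; infer_instance

def pvWitness_total_winnings : (List (String × Int)) := [("A", 1)]

def Spec_total_winnings (bids : List (String × Int)) (out : Int) : Prop := out = total_winnings_alt bids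
instance (bids : List (String × Int)) (out : Int) : Decidable (Spec_total_winnings bids out) := by unfold Spec_total_winnings; infer_instance

-- ===== CLAIM (what is proved, stated in full; the proofs are below) =====
def Claim_equal_total_winnings : Prop := ∀ (bids : List (String × Int)), Dom_total_winnings bids → Pre_total_winnings bids → Spec_total_winnings bids (total_winnings bids)

-- ===== LEMMAS AND PROOFS =====

def pvIdx (c : Char) : Int := PySem.Str.find "23456789TJQKA" (String.ofList [c])
def pvDig (c : Char) : Char := pvHexDig (pvIdx c)

-- A's coc cascade on counts-of-counts equals B's cascade on multiplicity counts
theorem pv_cascade (c5 c4 c3 c2 : Nat) :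
    (if (c5 : Int) = 1 then (6 : Int) else if (c4 : Int) = 1 then 5
      else if (c3 : Int) = 1 ∧ (c2 : Int) = 1 then 4
      else if (c3 : Int) = 1 then 3 else if (c2 : Int) = 2 then 2 else if (c2 : Int) = 1 then 1 else 0)
    = (if c5 = 1 then 6 else if c4 = 1 then 5 else if c3 = 1 then (if c2 = 1 then 4 else 3)
      else if c2 = 2 then 2 else if c2 = 1 then 1 else 0) := by
  split_ifs <;> omega

-- A's key string is '0','x', hex digit of B's type, then the card digits
theorem pv_rank_hand_eq (hand : String) :
    rank_hand hand = String.ofList ('0' :: 'x' :: pvHexDig (pvHandKey hand).1 :: (rank_hand_by_cards hand).toList) := by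
  simp only [rank_hand, pvHandKey, ← PySem.Dict.counter_eq_foldl,
    PySem.Dict.getD_counter, PySem.List.count_eq]
  exact congrArg (fun r => String.ofList ('0' :: 'x' :: pvHexDig r :: (rank_hand_by_cards hand).toList))
    (pv_cascade _ _ _ _)

theorem pv_rank_mem (hand : String) : (pvHandKey hand).1 ∈ ([0, 1, 2, 3, 4, 5, 6] : List Int) := by
  simp only [pvHandKey]
  split_ifs <;> simp

-- each card's CARDS_ORDER entry sliced by [2:] is its single hex digit
theorem pv_cards_slice : ∀ c ∈ pvCardsRev,
    (PySem.Str.slice (CARDS_ORDER.getD c "") (some 2) none).toList = [pvDig c] := by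
  intro c hc; fin_cases hc <;> rfl

theorem pv_by_cards (hand : String) (hc : ∀ c ∈ hand.toList, c ∈ pvCardsRev) :
    (rank_hand_by_cards hand).toList = hand.toList.map pvDig := by
  unfold rank_hand_by_cards
  rw [PySem.Str.toList_join, List.map_map]
  have h1 : hand.toList.map (String.toList ∘ fun c => PySem.Str.slice (CARDS_ORDER.getD c "") (some 2) none)
      = hand.toList.map (fun c => [pvDig c]) :=
    List.map_congr_left (fun c hm => pv_cards_slice c (hc c hm))
  rw [h1, show hand.toList.map (fun c => [pvDig c]) = (hand.toList.map pvDig).map (fun c => [c]) by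
    rw [List.map_map]; rfl]
  exact PySem.Chars.join_nil_singletons (hand.toList.map pvDig)

theorem pv_dig_lt : ∀ c ∈ pvCardsRev, ∀ d ∈ pvCardsRev, (pvDig c < pvDig d ↔ pvIdx c < pvIdx d) := by
  intro c hc d hd; fin_cases hc <;> fin_cases hd <;> decide

theorem pv_dig_eq : ∀ c ∈ pvCardsRev, ∀ d ∈ pvCardsRev, (pvDig c = pvDig d ↔ pvIdx c = pvIdx d) := by
  intro c hc d hd; fin_cases hc <;> fin_cases hd <;> decide

theorem pv_dig_inj : ∀ c ∈ pvCardsRev, ∀ d ∈ pvCardsRev, pvDig c = pvDig d → c = d := by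
  intro c hc d hd; fin_cases hc <;> fin_cases hd <;> decide

theorem pv_rankdig : ∀ r ∈ ([0, 1, 2, 3, 4, 5, 6] : List Int), ∀ s ∈ ([0, 1, 2, 3, 4, 5, 6] : List Int),
    (pvHexDig r < pvHexDig s ↔ r < s) ∧ (pvHexDig r = pvHexDig s ↔ r = s) := by
  intro r hr s hs; fin_cases hr <;> fin_cases hs <;> exact ⟨by decide, by decide⟩

theorem pv_lex_cons_cons {α : Type} [LinearOrder α] (a b : α) (l₁ l₂ : List α) :
    List.Lex (· < ·) (a :: l₁) (b :: l₂) ↔ a < b ∨ (a = b ∧ List.Lex (· < ·) l₁ l₂) := by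
  constructor
  · intro h
    cases h with
    | rel h => exact .inl h
    | cons h => exact .inr ⟨rfl, h⟩
  · rintro (h | ⟨rfl, h⟩)
    · exact .rel h
    · exact .cons h

theorem pv_map_lex (l₁ l₂ : List Char) (h₁ : ∀ c ∈ l₁, c ∈ pvCardsRev) (h₂ : ∀ c ∈ l₂, c ∈ pvCardsRev) :
    (List.Lex (· < ·) (l₁.map pvDig) (l₂.map pvDig) ↔ List.Lex (· < ·) (l₁.map pvIdx) (l₂.map pvIdx)) := by
  induction l₁ generalizing l₂ with
  | nil =>
    cases l₂ with
    | nil => constructor <;> intro h <;> cases h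
    | cons b t => simp only [List.map_nil, List.map_cons]; exact ⟨fun _ => .nil, fun _ => .nil⟩
  | cons a t ih =>
    cases l₂ with
    | nil =>
      simp only [List.map_nil, List.map_cons]
      constructor <;> intro h <;> cases h
    | cons b t₂ =>
      simp only [List.map_cons]
      rw [pv_lex_cons_cons, pv_lex_cons_cons,
        pv_dig_lt a (h₁ a (by simp)) b (h₂ b (by simp)),
        pv_dig_eq a (h₁ a (by simp)) b (h₂ b (by simp)),
        ih t₂ (fun c hcm => h₁ c (by simp [hcm])) (fun c hcm => h₂ c (by simp [hcm]))]

theorem pv_map_dig_inj : ∀ (l₁ l₂ : List Char), (∀ c ∈ l₁, c ∈ pvCardsRev) → (∀ c ∈ l₂, c ∈ pvCardsRev) →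
    l₁.map pvDig = l₂.map pvDig → l₁ = l₂ := by
  intro l₁
  induction l₁ with
  | nil => intro l₂ _ _ h; cases l₂ <;> simp_all
  | cons a t ih =>
    intro l₂ h₁ h₂ h
    cases l₂ with
    | nil => simp_all
    | cons b t₂ =>
      simp only [List.map_cons, List.cons.injEq] at h
      have hab := pv_dig_inj a (h₁ a (by simp)) b (h₂ b (by simp)) h.1
      subst hab
      exact congrArg (a :: ·) (ih t₂ (fun c hc => h₁ c (by simp [hc])) (fun c hc => h₂ c (by simp [hc])) h.2)

-- the key-order lemma: A's string key and B's tuple key induce the same order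
theorem pv_key_order (a b : String) (ha : ∀ c ∈ a.toList, c ∈ pvCardsRev) (hb : ∀ c ∈ b.toList, c ∈ pvCardsRev) :
    (rank_hand a < rank_hand b
      ↔ (pvHandKey a).1 < (pvHandKey b).1 ∨ ((pvHandKey a).1 = (pvHandKey b).1 ∧ (pvHandKey a).2 < (pvHandKey b).2)) := by
  have hconvC : ∀ (u v : List Char), u < v ↔ List.Lex (· < ·) u v := fun u v => Iff.rfl
  have hconvI : ∀ (u v : List Int), u < v ↔ List.Lex (· < ·) u v := fun u v => Iff.rfl
  rw [pv_rank_hand_eq a, pv_rank_hand_eq b, String.lt_iff_toList_lt]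
  have hmk : ∀ (l : List Char), (String.ofList l).toList = l := fun l => String.toList_ofList
  rw [hmk, hmk, pv_by_cards a ha, pv_by_cards b hb, hconvC]
  simp only [pv_lex_cons_cons]
  rw [(pv_rankdig _ (pv_rank_mem a) _ (pv_rank_mem b)).1,
    (pv_rankdig _ (pv_rank_mem a) _ (pv_rank_mem b)).2,
    pv_map_lex a.toList b.toList ha hb, hconvI ((pvHandKey a).2) ((pvHandKey b).2)]
  simp
  exact Iff.rfl

-- hence A's string key is injective on card hands
theorem pv_rank_inj (a b : String) (ha : ∀ c ∈ a.toList, c ∈ pvCardsRev) (hb : ∀ c ∈ b.toList, c ∈ pvCardsRev)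
    (h : rank_hand a = rank_hand b) : a = b := by
  rw [pv_rank_hand_eq a, pv_rank_hand_eq b] at h
  have h2 := congrArg String.toList h
  rw [String.toList_ofList, String.toList_ofList, pv_by_cards a ha, pv_by_cards b hb] at h2
  simp only [List.cons.injEq] at h2
  have h3 := pv_map_dig_inj a.toList b.toList ha hb h2.2.2.2
  have := congrArg String.ofList h3
  rwa [String.ofList_toList, String.ofList_toList] at this

theorem pv_cmp_eq (a b : String) (ha : ∀ c ∈ a.toList, c ∈ pvCardsRev) (hb : ∀ c ∈ b.toList, c ∈ pvCardsRev) :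
    decide (rank_hand a < rank_hand b) = pvKeyLt (pvHandKey a) (pvHandKey b) := by
  simp only [pvKeyLt]
  have h := pv_key_order a b ha hb
  rcases lt_trichotomy (pvHandKey a).1 (pvHandKey b).1 with h1 | h1 | h1
  · simp [h, h1]
  · simp [h, h1]
  · simp [h, asymm h1, h1.ne']

theorem pv_insertBy_congr {α : Type} (f g : α → α → Bool) (x : α) (acc : List α)
    (h : ∀ b ∈ acc, f x b = g x b) :
    PySem.List.insertBy f x acc = PySem.List.insertBy g x acc := by
  induction acc with
  | nil => rfl
  | cons y ys ih =>
    simp only [PySem.List.insertBy]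
    rw [h y (List.mem_cons_self)]
    by_cases hg : g x y
    · simp [hg]
    · simp only [hg, Bool.false_eq_true, if_false]
      exact congrArg (y :: ·) (ih (fun b hb => h b (List.mem_cons_of_mem _ hb)))

theorem pv_foldl_insertBy_congr {α : Type} (f g : α → α → Bool) (xs : List α) (acc : List α)
    (h : ∀ a ∈ xs, ∀ b, (b ∈ acc ∨ b ∈ xs) → f a b = g a b) :
    xs.foldl (fun acc x => PySem.List.insertBy f x acc) acc
      = xs.foldl (fun acc x => PySem.List.insertBy g x acc) acc := by
  induction xs generalizing acc with
  | nil => rfl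
  | cons a xs ih =>
    simp only [List.foldl_cons]
    rw [pv_insertBy_congr f g a acc (fun b hb => h a (by simp) b (Or.inl hb))]
    refine ih (PySem.List.insertBy g a acc) ?_
    intro a' ha' b hb
    refine h a' (by simp [ha']) b ?_
    rcases hb with hb | hb
    · rcases (PySem.List.mem_insertBy g a b acc).1 hb with rfl | hbm
      · exact Or.inr (by simp)
      · exact Or.inl hbm
    · exact Or.inr (by simp [hb])

-- a memoisation dict built by 'for x: d[x] = g(x)' looks up to g on the keys
theorem pv_ranks_getD (l : List String) (r0 : PySem.Dict String String) (x : String) :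
    (l.foldl (fun r b => r.insert b (rank_hand b)) r0).getD x ""
      = if x ∈ l then rank_hand x else r0.getD x "" := by
  induction l generalizing r0 with
  | nil => simp
  | cons b t ih =>
    simp only [List.foldl_cons]
    rw [ih]
    by_cases hx : x ∈ t
    · simp [hx]
    · by_cases hxb : x = b
      · subst hxb; simp [hx]
      · simp [hx, hxb, PySem.Dict.getD_insert]

theorem pv_memo_getD (l : List (String × Int)) (r0 : PySem.Dict String (Int × List Int)) (x : String) :
    (l.foldl (fun r p => r.insert p.1 (pvHandKey p.1)) r0).getD x (0, [])
      = if x ∈ l.map Prod.fst then pvHandKey x else r0.getD x (0, []) := by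
  induction l generalizing r0 with
  | nil => simp
  | cons p t ih =>
    simp only [List.foldl_cons, List.map_cons]
    rw [ih]
    by_cases hx : x ∈ t.map Prod.fst
    · simp [hx]
    · by_cases hxb : x = p.1
      · subst hxb; simp [hx]
      · simp [hx, hxb, PySem.Dict.getD_insert]

-- the heart of B: in a strictly key-increasing list, the element at 1-based position
-- i + 1 + r has exactly i + r smaller-keyed elements, so the enumerate-sum is the counting sum
theorem pv_enum_count (f : String → String) (g : String → Int) :
    ∀ (L : List String), L.Pairwise (fun a b => f a < f b) → ∀ (i : Int),
    ((PySem.List.enumerate L i).map (fun rb => (rb.1 + 1) * g rb.2)).sum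
      = (L.map (fun b => (i + 1 + (L.countP (fun o => decide (f o < f b)) : Int)) * g b)).sum := by
  intro L
  induction L with
  | nil => intro _ i; simp [PySem.List.enumerate]
  | cons a T ih =>
    intro hp i
    obtain ⟨ha, hT⟩ := List.pairwise_cons.1 hp
    simp only [PySem.List.enumerate_cons, List.map_cons, List.sum_cons]
    rw [ih hT (i + 1)]
    have hza : ((a :: T).countP (fun o => decide (f o < f a)) : Int) = 0 := by
      have h1 : T.countP (fun o => decide (f o < f a)) = 0 := by
        rw [List.countP_eq_zero]
        intro o ho
        simp only [decide_eq_true_eq]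
        exact asymm (ha o ho)
      rw [List.countP_cons, h1]
      simp
    have hmap : T.map (fun b => (i + 1 + 1 + (T.countP (fun o => decide (f o < f b)) : Int)) * g b)
        = T.map (fun b => (i + 1 + ((a :: T).countP (fun o => decide (f o < f b)) : Int)) * g b) := by
      refine List.map_congr_left ?_
      intro b hb
      rw [List.countP_cons]
      simp only [ha b hb, decide_true]
      push_cast
      ring_nf
    rw [hmap, hza]
    ring_nf

-- ===== VERDICT (by name: the statement is the Claim_ definition above) =====
theorem total_winnings_spec : Claim_equal_total_winnings := by
  intro bids hdom hpre
  obtain ⟨hnd, hcards⟩ := hpre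
  unfold Spec_total_winnings
  have hkeys : (PySem.Dict.mk bids).keys = bids.map Prod.fst := rfl
  have hmemcards : ∀ k ∈ bids.map Prod.fst, ∀ c ∈ k.toList, c ∈ pvCardsRev := by
    intro k hk c hcc
    obtain ⟨p, hp, rfl⟩ := List.mem_map.1 hk
    have h := hcards p hp
    rw [List.all_eq_true] at h
    have h2 := h c hcc
    rw [decide_eq_true_eq] at h2
    exact h2
  have hndk : (PySem.Dict.mk bids).keys.Nodup := by rw [hkeys]; exact hnd
  -- B as the counting sum
  have hB : total_winnings_alt bids
      = (bids.map (fun p => (1 + ((bids.map Prod.fst).countP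
          (fun o => pvKeyLt (pvHandKey o) (pvHandKey p.1)) : Int)) * p.2)).sum := by
    simp only [total_winnings_alt]
    rw [PySem.List.foldl_add (g := fun p : String × Int =>
      (1 + (bids.map Prod.fst).foldl
        (fun n o => if pvKeyLt
          ((bids.foldl (fun d p => d.insert p.1 (pvHandKey p.1)) (PySem.Dict.empty : PySem.Dict String (Int × List Int))).getD o (0, []))
          ((bids.foldl (fun d p => d.insert p.1 (pvHandKey p.1)) (PySem.Dict.empty : PySem.Dict String (Int × List Int))).getD p.1 (0, []))
          then n + 1 else n) (0 : Int)) * p.2), zero_add]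
    refine congrArg List.sum (List.map_congr_left ?_)
    intro p hp
    rw [PySem.List.foldl_if_add_one, zero_add]
    have hcnt : (bids.map Prod.fst).countP (fun o => pvKeyLt
          ((bids.foldl (fun d p => d.insert p.1 (pvHandKey p.1)) (PySem.Dict.empty : PySem.Dict String (Int × List Int))).getD o (0, []))
          ((bids.foldl (fun d p => d.insert p.1 (pvHandKey p.1)) (PySem.Dict.empty : PySem.Dict String (Int × List Int))).getD p.1 (0, [])))
        = (bids.map Prod.fst).countP (fun o => pvKeyLt (pvHandKey o) (pvHandKey p.1)) := by
      apply List.countP_congr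
      intro o ho
      rw [pv_memo_getD, pv_memo_getD, if_pos ho,
        if_pos (List.mem_map.2 ⟨p, hp, rfl⟩)]
    rw [hcnt]
  rw [hB]
  -- A: unfold and normalise the winnings loop
  simp only [total_winnings]
  rw [PySem.List.foldl_append_singleton_eq_map, List.nil_append]
  -- replace the memoised sort key by rank_hand itself
  have hsortA :
      PySem.List.sorted (PySem.Dict.mk bids).keys
        (fun x => ((PySem.Dict.mk bids).keys.foldl (fun r b => r.insert b (rank_hand b))
          (PySem.Dict.empty : PySem.Dict String String)).getD x "") false
      = PySem.List.sorted (PySem.Dict.mk bids).keys rank_hand false := by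
    rw [PySem.List.sorted_eq_foldl_insertBy, PySem.List.sorted_eq_foldl_insertBy]
    apply pv_foldl_insertBy_congr
    intro a hak b hb
    have hbk : b ∈ (PySem.Dict.mk bids).keys := by
      rcases hb with hb | hb
      · cases hb
      · exact hb
    rw [pv_ranks_getD, pv_ranks_getD, if_pos hak, if_pos hbk]
  rw [hsortA]
  have hperm : (PySem.List.sorted (PySem.Dict.mk bids).keys rank_hand false).Perm
      (PySem.Dict.mk bids).keys := PySem.List.sorted_perm _ _ _
  have hSKcards : ∀ k ∈ PySem.List.sorted (PySem.Dict.mk bids).keys rank_hand false,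
      ∀ c ∈ k.toList, c ∈ pvCardsRev := by
    intro k hk
    exact hmemcards k (by rw [← hkeys]; exact hperm.mem_iff.1 hk)
  -- strict sortedness: sorted ≤ together with distinctness and key injectivity
  have hstrict : (PySem.List.sorted (PySem.Dict.mk bids).keys rank_hand false).Pairwise
      (fun a b => rank_hand a < rank_hand b) := by
    have hle := PySem.List.sorted_pairwise (PySem.Dict.mk bids).keys rank_hand
    have hne : (PySem.List.sorted (PySem.Dict.mk bids).keys rank_hand false).Pairwise (· ≠ ·) :=
      hperm.nodup_iff.2 hndk
    refine (hle.and hne).imp_of_mem ?_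
    intro a b ha hb h
    exact lt_of_le_of_ne h.1 (fun he => h.2 (pv_rank_inj a b (hSKcards a ha) (hSKcards b hb) he))
  rw [pv_enum_count rank_hand (fun b => (PySem.Dict.mk bids).getD b 0) _ hstrict 0]
  -- counting over the sorted list = counting over the keys, string order = tuple order
  have hmap1 : (PySem.List.sorted (PySem.Dict.mk bids).keys rank_hand false).map
        (fun b => (0 + 1 + ((PySem.List.sorted (PySem.Dict.mk bids).keys rank_hand false).countP
          (fun o => decide (rank_hand o < rank_hand b)) : Int)) * (PySem.Dict.mk bids).getD b 0)
      = (PySem.List.sorted (PySem.Dict.mk bids).keys rank_hand false).map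
        (fun b => (1 + ((bids.map Prod.fst).countP
          (fun o => pvKeyLt (pvHandKey o) (pvHandKey b)) : Int)) * (PySem.Dict.mk bids).getD b 0) := by
    refine List.map_congr_left ?_
    intro b hb
    have hc1 : (PySem.List.sorted (PySem.Dict.mk bids).keys rank_hand false).countP
          (fun o => decide (rank_hand o < rank_hand b))
        = (bids.map Prod.fst).countP (fun o => decide (rank_hand o < rank_hand b)) := by
      rw [← hkeys]; exact hperm.countP_eq _
    have hc2 : (bids.map Prod.fst).countP (fun o => decide (rank_hand o < rank_hand b))
        = (bids.map Prod.fst).countP (fun o => pvKeyLt (pvHandKey o) (pvHandKey b)) := by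
      apply List.countP_congr
      intro o ho
      rw [pv_cmp_eq o b (hmemcards o ho) (hSKcards b hb)]
    rw [hc1, hc2, zero_add]
  rw [hmap1]
  rw [(hperm.map _).sum_eq]
  rw [hkeys, List.map_map]
  refine congrArg List.sum (List.map_congr_left ?_).symm
  intro p hp
  have hpi : (p.1, p.2) ∈ (PySem.Dict.mk bids).items := by simpa using hp
  have hgd : (PySem.Dict.mk bids).getD p.1 0 = p.2 :=
    PySem.Dict.getD_of_mem_items (PySem.Dict.mk bids) hpi hndk 0
  simp [hgd]
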